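-- pv_equiv track=rewrite | github.com/udacity/cn-python-foundation | investigate texts and calls/ZH/Task4.py | countingTexter
-- ===== SOURCE A (Python) =====
-- def countingTexter(texts):
--     result = {}
--     for text in texts:
--         sender = text[0].strip()
--         receiver = text[1].strip()
--
--         if sender in result:
--             result[sender]['send'] += 1
--         else:
--             result[sender] = {}
--             result[sender]["send"] = 1
--             result[sender]["receive"] = 0
--
--         if receiver in result:
--             result[receiver]["receive"] += 1
--         else:
--             result[receiver] = {}
--             result[receiver]["receive"] = 1
--             result[receiver]["send"] = 0
--     return result
-- ===== SOURCE B (Python) =====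
-- def countingTexter(texts):
--     # flatten into a (person, role) event stream, tally uniformly, then fill in missing zero counts
--     events = []
--     for text in texts:
--         events.append((text[0].strip(), 'send'))
--         events.append((text[1].strip(), 'receive'))
--     result = {}
--     for person, role in events:
--         tally = result.setdefault(person, {})
--         tally[role] = tally.get(role, 0) + 1
--     for tally in result.values():
--         tally.setdefault('send', 0)
--         tally.setdefault('receive', 0)
--     return result
-- ===== Notes on version B (the rewrite author's own statement) =====
-- stated objective: alternative
-- what changed: A's single interleaved pass with per-branch dict initialisation is replaced by a count-style decomposition: flatten the texts into a (person, role) event stream, tally the events in one uniform loop, then zero-fill any missing counter; Pre_ excludes texts of length < 2, on which A raises IndexError.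
import Mathlib
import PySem

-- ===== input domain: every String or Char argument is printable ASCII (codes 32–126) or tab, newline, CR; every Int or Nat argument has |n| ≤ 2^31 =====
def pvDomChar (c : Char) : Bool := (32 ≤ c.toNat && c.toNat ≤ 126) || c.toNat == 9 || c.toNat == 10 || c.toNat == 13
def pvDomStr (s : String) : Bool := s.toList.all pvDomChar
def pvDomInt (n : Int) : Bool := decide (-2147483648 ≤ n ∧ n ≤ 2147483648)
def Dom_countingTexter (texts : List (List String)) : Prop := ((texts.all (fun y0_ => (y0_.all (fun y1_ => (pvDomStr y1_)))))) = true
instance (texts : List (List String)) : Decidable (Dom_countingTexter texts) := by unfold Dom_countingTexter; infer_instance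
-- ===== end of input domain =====

-- B replaces A's single interleaved pass (per-branch dict initialisation) by a different decomposition:
-- flatten the texts into a (person, role) event stream, tally the events uniformly, then fill in missing zero counts.

-- ===== PORT A =====
-- one loop step of A: sender then receiver, each with an in-dict test;
-- `result[x]['k'] += 1` is only reached when x is already a key, where the inner dict
-- always holds 'k', so `inn.modify "k" 0 (· + 1)` is exact there.
def pvStepA (res : PySem.Dict String (PySem.Dict String Int)) (text : List String) :
    PySem.Dict String (PySem.Dict String Int) :=
  let sender := PySem.Str.strip (PySem.List.pyGetD text 0 "")
  let receiver := PySem.Str.strip (PySem.List.pyGetD text 1 "")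
  let res1 := if res.contains sender then
      res.modify sender PySem.Dict.empty (fun inn => inn.modify "send" 0 (· + 1))
    else
      res.insert sender ((PySem.Dict.empty.insert "send" (1 : Int)).insert "receive" 0)
  if res1.contains receiver then
    res1.modify receiver PySem.Dict.empty (fun inn => inn.modify "receive" 0 (· + 1))
  else
    res1.insert receiver ((PySem.Dict.empty.insert "receive" (1 : Int)).insert "send" 0)

def countingTexter (texts : List (List String)) : List (String × List (String × Int)) :=
  ((texts.foldl pvStepA PySem.Dict.empty).items).map (fun kv => (kv.1, kv.2.items))

-- ===== PORT B =====
-- body of B's tally loop: `tally = result.setdefault(person, {}); tally[role] = tally.get(role, 0) + 1`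
def pvStepB (res : PySem.Dict String (PySem.Dict String Int)) (e : String × String) :
    PySem.Dict String (PySem.Dict String Int) :=
  (res.setdefault e.1 PySem.Dict.empty).modify e.1 PySem.Dict.empty
    (fun tally => tally.modify e.2 0 (· + 1))

-- body of B's final loop: `tally.setdefault('send', 0); tally.setdefault('receive', 0)`
def pvFill (tally : PySem.Dict String Int) : PySem.Dict String Int :=
  (tally.setdefault "send" 0).setdefault "receive" 0

def countingTexter_alt (texts : List (List String)) : List (String × List (String × Int)) :=
  let events := texts.foldl (fun es text =>
    (es ++ [(PySem.Str.strip (PySem.List.pyGetD text 0 ""), "send")])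
       ++ [(PySem.Str.strip (PySem.List.pyGetD text 1 ""), "receive")]) []
  let result := events.foldl pvStepB PySem.Dict.empty
  result.items.map (fun kv => (kv.1, (pvFill kv.2).items))

-- ===== PRECONDITION & SPEC =====
-- A raises IndexError on any text of length < 2 (so does B); exactly those inputs are excluded.
def Pre_countingTexter (texts : List (List String)) : Prop := ∀ t ∈ texts, 2 ≤ t.length
instance (texts : List (List String)) : Decidable (Pre_countingTexter texts) := by
  unfold Pre_countingTexter; infer_instance
def pvWitness_countingTexter : List (List String) := [["alice ", "bob"], ["bob", " carol"]]

def Spec_countingTexter (texts : List (List String)) (out : List (String × List (String × Int))) : Prop := out = countingTexter_alt texts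
instance (texts : List (List String)) (out : List (String × List (String × Int))) : Decidable (Spec_countingTexter texts out) := by unfold Spec_countingTexter; infer_instance

-- ===== CLAIM (what is proved, stated in full; the proofs are below) =====
def Claim_equal_countingTexter : Prop := ∀ (texts : List (List String)), Dom_countingTexter texts → Pre_countingTexter texts → Spec_countingTexter texts (countingTexter texts)

-- ===== LEMMAS AND PROOFS =====

-- the two events a text contributes
def pvEvents (text : List String) : List (String × String) :=
  [(PySem.Str.strip (PySem.List.pyGetD text 0 ""), "send"),
   (PySem.Str.strip (PySem.List.pyGetD text 1 ""), "receive")]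

-- A's per-text step, reformulated as one step per event
def pvStepEvA (res : PySem.Dict String (PySem.Dict String Int)) (e : String × String) :
    PySem.Dict String (PySem.Dict String Int) :=
  if res.contains e.1 then
    res.modify e.1 PySem.Dict.empty (fun inn => inn.modify e.2 0 (· + 1))
  else
    res.insert e.1 (if e.2 == "send" then (PySem.Dict.empty.insert "send" (1 : Int)).insert "receive" 0
                    else (PySem.Dict.empty.insert "receive" (1 : Int)).insert "send" 0)

-- the shapes B's tally dicts can take
def pvShape (t : PySem.Dict String Int) : Prop :=
  (∃ n, t = PySem.Dict.mk [("send", n)]) ∨ (∃ n, t = PySem.Dict.mk [("receive", n)]) ∨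
  (∃ a b, t = PySem.Dict.mk [("send", a), ("receive", b)]) ∨
  (∃ a b, t = PySem.Dict.mk [("receive", a), ("send", b)])

-- simulation invariant: A's dict is B's dict with every value zero-filled
def pvInvariant (dA dB : PySem.Dict String (PySem.Dict String Int)) : Prop :=
  dB.keys.Nodup ∧
  dA.items = dB.items.map (fun kv => (kv.1, pvFill kv.2)) ∧
  ∀ kv ∈ dB.items, pvShape kv.2

lemma pvStepA_factor (d : PySem.Dict String (PySem.Dict String Int)) (t : List String) :
    pvStepA d t = (pvEvents t).foldl pvStepEvA d := by
  simp [pvStepA, pvStepEvA, pvEvents]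

lemma pvFoldA_factor (texts : List (List String)) (d : PySem.Dict String (PySem.Dict String Int)) :
    texts.foldl pvStepA d = (texts.flatMap pvEvents).foldl pvStepEvA d := by
  induction texts generalizing d with
  | nil => rfl
  | cons t ts ih => simp [List.foldl_cons, pvStepA_factor, List.foldl_append, ih]

lemma pvEventsB (texts : List (List String)) (init : List (String × String)) :
    texts.foldl (fun es text =>
      (es ++ [(PySem.Str.strip (PySem.List.pyGetD text 0 ""), "send")])
         ++ [(PySem.Str.strip (PySem.List.pyGetD text 1 ""), "receive")]) init
    = init ++ texts.flatMap pvEvents := by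
  induction texts generalizing init with
  | nil => simp
  | cons t ts ih =>
    rw [List.foldl_cons, ih, List.flatMap_cons]
    simp [pvEvents]

lemma pvStepB_modify (d : PySem.Dict String (PySem.Dict String Int)) (e : String × String) :
    pvStepB d e = d.modify e.1 PySem.Dict.empty (fun tally => tally.modify e.2 0 (· + 1)) := by
  unfold pvStepB
  by_cases hc : d.contains e.1
  · rw [PySem.Dict.setdefault_of_contains d _ hc]
  · rw [PySem.Dict.setdefault_of_not_contains d _ (by simpa using hc)]
    simp [PySem.Dict.modify, PySem.Dict.getD_insert_self, PySem.Dict.insert_insert_self,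
      PySem.Dict.getD_of_not_contains d PySem.Dict.empty (by simpa using hc)]

lemma pvCommute (t : PySem.Dict String Int) (role : String)
    (hrole : role = "send" ∨ role = "receive") (hs : pvShape t) :
    pvFill (t.modify role 0 (· + 1)) = (pvFill t).modify role 0 (· + 1) := by
  rcases hrole with rfl | rfl <;>
    rcases hs with ⟨n, rfl⟩ | ⟨n, rfl⟩ | ⟨a, b, rfl⟩ | ⟨a, b, rfl⟩ <;>
      simp [pvFill, PySem.Dict.modify, PySem.Dict.insert, PySem.Dict.getD, PySem.Dict.get?,
        PySem.Dict.setdefault, PySem.Dict.contains]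

lemma pvShapeStep (t : PySem.Dict String Int) (role : String)
    (hrole : role = "send" ∨ role = "receive") (hs : pvShape t) :
    pvShape (t.modify role 0 (· + 1)) := by
  rcases hrole with rfl | rfl <;>
    rcases hs with ⟨n, rfl⟩ | ⟨n, rfl⟩ | ⟨a, b, rfl⟩ | ⟨a, b, rfl⟩
  · exact Or.inl ⟨n + 1, by simp [PySem.Dict.modify, PySem.Dict.insert, PySem.Dict.getD, PySem.Dict.get?]⟩
  · exact Or.inr (Or.inr (Or.inr ⟨n, 1, by simp [PySem.Dict.modify, PySem.Dict.insert, PySem.Dict.getD, PySem.Dict.get?]⟩))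
  · exact Or.inr (Or.inr (Or.inl ⟨a + 1, b, by simp [PySem.Dict.modify, PySem.Dict.insert, PySem.Dict.getD, PySem.Dict.get?]⟩))
  · exact Or.inr (Or.inr (Or.inr ⟨a, b + 1, by simp [PySem.Dict.modify, PySem.Dict.insert, PySem.Dict.getD, PySem.Dict.get?]⟩))
  · exact Or.inr (Or.inr (Or.inl ⟨n, 1, by simp [PySem.Dict.modify, PySem.Dict.insert, PySem.Dict.getD, PySem.Dict.get?]⟩))
  · exact Or.inr (Or.inl ⟨n + 1, by simp [PySem.Dict.modify, PySem.Dict.insert, PySem.Dict.getD, PySem.Dict.get?]⟩)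
  · exact Or.inr (Or.inr (Or.inl ⟨a, b + 1, by simp [PySem.Dict.modify, PySem.Dict.insert, PySem.Dict.getD, PySem.Dict.get?]⟩))
  · exact Or.inr (Or.inr (Or.inr ⟨a + 1, b, by simp [PySem.Dict.modify, PySem.Dict.insert, PySem.Dict.getD, PySem.Dict.get?]⟩))

lemma pvKeysEq (dA dB : PySem.Dict String (PySem.Dict String Int))
    (h : dA.items = dB.items.map (fun kv => (kv.1, pvFill kv.2))) : dA.keys = dB.keys := by
  show dA.items.map Prod.fst = dB.items.map Prod.fst
  rw [h, List.map_map]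
  rfl

lemma pvFillSend : pvFill (PySem.Dict.empty.modify "send" 0 (· + 1))
    = (PySem.Dict.empty.insert "send" (1 : Int)).insert "receive" 0 := by decide

lemma pvFillRecv : pvFill (PySem.Dict.empty.modify "receive" 0 (· + 1))
    = (PySem.Dict.empty.insert "receive" (1 : Int)).insert "send" 0 := by decide

lemma pvStepInv (dA dB : PySem.Dict String (PySem.Dict String Int)) (e : String × String)
    (hrole : e.2 = "send" ∨ e.2 = "receive") (h : pvInvariant dA dB) :
    pvInvariant (pvStepEvA dA e) (pvStepB dB e) := by
  obtain ⟨hnd, hitems, hshape⟩ := h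
  have hkeys := pvKeysEq dA dB hitems
  rw [pvStepB_modify]
  by_cases hc : dB.contains e.1
  · -- present: in-place update on both sides
    have hcA : dA.contains e.1 = true := by
      rw [PySem.Dict.contains_iff_mem_keys, hkeys, ← PySem.Dict.contains_iff_mem_keys]; exact hc
    obtain ⟨tB, hg⟩ : ∃ tB, dB.get? e.1 = some tB := by
      have := PySem.Dict.contains_eq_isSome_get? (d := dB) (k := e.1)
      rw [hc] at this
      exact Option.isSome_iff_exists.mp this.symm
    have hgD : dB.getD e.1 PySem.Dict.empty = tB := PySem.Dict.getD_of_get?_eq_some dB _ hg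
    have hmemB : (e.1, tB) ∈ dB.items := PySem.Dict.mem_items_of_get?_eq_some dB hg
    have hndA : dA.keys.Nodup := by rw [hkeys]; exact hnd
    have hgA : dA.getD e.1 PySem.Dict.empty = pvFill tB := by
      refine PySem.Dict.getD_of_mem_items dA ?_ hndA _
      rw [hitems]
      exact List.mem_map.mpr ⟨(e.1, tB), hmemB, rfl⟩
    have hshB : pvShape tB := hshape _ hmemB
    unfold pvStepEvA
    rw [if_pos hcA]
    have hA : dA.modify e.1 PySem.Dict.empty (fun inn => inn.modify e.2 0 (· + 1))
        = dA.insert e.1 ((pvFill tB).modify e.2 0 (· + 1)) := by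
      simp [PySem.Dict.modify, hgA]
    have hB : dB.modify e.1 PySem.Dict.empty (fun tally => tally.modify e.2 0 (· + 1))
        = dB.insert e.1 (tB.modify e.2 0 (· + 1)) := by
      simp [PySem.Dict.modify, hgD]
    rw [hA, hB]
    refine ⟨?_, ?_, ?_⟩
    · show (dB.insert e.1 _).items.map Prod.fst |>.Nodup
      have := PySem.Dict.keys_insert_of_contains dB (tB.modify e.2 0 (· + 1)) hc
      rw [show (dB.insert e.1 (tB.modify e.2 0 (· + 1))).items.map Prod.fst
          = (dB.insert e.1 (tB.modify e.2 0 (· + 1))).keys from rfl, this]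
      exact hnd
    · rw [PySem.Dict.items_insert_of_contains dA _ hcA, PySem.Dict.items_insert_of_contains dB _ hc,
        hitems, List.map_map, List.map_map]
      apply List.map_congr_left
      intro kv hkv
      by_cases hk : kv.1 == e.1
      · simp only [Function.comp_apply, hk, if_pos]
        rw [pvCommute tB e.2 hrole hshB]
      · simp only [Function.comp_apply]
        rw [if_neg (by simpa using hk), if_neg (by simpa using hk)]
    · intro kv hkv
      rcases (PySem.Dict.mem_items_insert _ _ _ _).mp hkv with hkv1 | ⟨hkv2, _⟩
      · rw [hkv1]
        exact pvShapeStep tB e.2 hrole hshB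
      · exact hshape _ hkv2
  · -- absent: both sides append a fresh key
    have hcA : dA.contains e.1 = false := by
      rw [← Bool.not_eq_true, PySem.Dict.contains_iff_mem_keys, hkeys,
        ← PySem.Dict.contains_iff_mem_keys]
      simpa using hc
    have hcB : dB.contains e.1 = false := by simpa using hc
    unfold pvStepEvA
    rw [if_neg (by simp [hcA])]
    have hB : dB.modify e.1 PySem.Dict.empty (fun tally => tally.modify e.2 0 (· + 1))
        = dB.insert e.1 (PySem.Dict.empty.modify e.2 0 (· + 1)) := by
      have hg0 : dB.getD e.1 PySem.Dict.empty = PySem.Dict.empty :=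
        PySem.Dict.getD_of_not_contains dB PySem.Dict.empty hcB
      simp only [PySem.Dict.modify, hg0]
    rw [hB]
    refine ⟨?_, ?_, ?_⟩
    · show (dB.insert e.1 _).items.map Prod.fst |>.Nodup
      have := PySem.Dict.keys_insert_of_not_contains dB (PySem.Dict.empty.modify e.2 0 (· + 1)) hcB
      rw [show (dB.insert e.1 (PySem.Dict.empty.modify e.2 0 (· + 1))).items.map Prod.fst
          = (dB.insert e.1 (PySem.Dict.empty.modify e.2 0 (· + 1))).keys from rfl, this]
      rw [List.nodup_append]
      refine ⟨hnd, List.nodup_singleton _, ?_⟩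
      intro a ha b hb
      rw [List.mem_singleton] at hb
      subst hb
      rintro rfl
      rw [← Bool.not_eq_true, PySem.Dict.contains_iff_mem_keys] at hcB
      exact hcB ha
    · rw [PySem.Dict.items_insert_of_not_contains dA _ hcA, PySem.Dict.items_insert_of_not_contains dB _ hcB,
        List.map_append, hitems]
      congr 1
      rcases hrole with hr | hr <;> rw [hr] <;> simp [pvFillSend, pvFillRecv]
    · intro kv hkv
      rcases (PySem.Dict.mem_items_insert _ _ _ _).mp hkv with hkv1 | ⟨hkv2, _⟩
      · rw [hkv1]
        rcases hrole with hr | hr <;> rw [hr]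
        · exact Or.inl ⟨1, by simp [PySem.Dict.modify, PySem.Dict.insert, PySem.Dict.getD, PySem.Dict.get?, PySem.Dict.empty]⟩
        · exact Or.inr (Or.inl ⟨1, by simp [PySem.Dict.modify, PySem.Dict.insert, PySem.Dict.getD, PySem.Dict.get?, PySem.Dict.empty]⟩)
      · exact hshape _ hkv2

lemma pvFoldInv (evs : List (String × String)) (dA dB : PySem.Dict String (PySem.Dict String Int))
    (hroles : ∀ e ∈ evs, e.2 = "send" ∨ e.2 = "receive") (h : pvInvariant dA dB) :
    pvInvariant (evs.foldl pvStepEvA dA) (evs.foldl pvStepB dB) := by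
  induction evs generalizing dA dB with
  | nil => exact h
  | cons e es ih =>
    rw [List.foldl_cons, List.foldl_cons]
    exact ih _ _ (fun x hx => hroles x (List.mem_cons_of_mem _ hx))
      (pvStepInv dA dB e (hroles e (List.mem_cons_self)) h)

-- ===== VERDICT (by name: the statement is the Claim_ definition above) =====
theorem countingTexter_spec : Claim_equal_countingTexter := by
  intro texts _ _
  unfold Spec_countingTexter countingTexter countingTexter_alt
  rw [pvEventsB, List.nil_append, pvFoldA_factor]
  have hroles : ∀ e ∈ texts.flatMap pvEvents, e.2 = "send" ∨ e.2 = "receive" := by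
    intro e he
    rcases List.mem_flatMap.mp he with ⟨t, _, ht⟩
    simp only [pvEvents, List.mem_cons, List.not_mem_nil, or_false] at ht
    rcases ht with rfl | rfl
    · exact Or.inl rfl
    · exact Or.inr rfl
  obtain ⟨_, hitems, _⟩ := pvFoldInv (texts.flatMap pvEvents) PySem.Dict.empty PySem.Dict.empty
    hroles ⟨by decide, rfl, by intro kv hkv; cases hkv⟩
  rw [hitems, List.map_map]
  rfl
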